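-- pv_equiv track=rewrite | github.com/sevewing/Advent-of-Code-2024 | day5/p2.py | check
-- ===== SOURCE A (Python) =====
-- def check(line, rule):
--     pn = line.pop(0)
--     if len(line) == 0:
--         return True
--     try:
--         for v in rule[pn]:
--             if v == line[0]:
--                 return check(line, rule)
--     except:
--         pass
--     return False
-- ===== SOURCE B (Python) =====
-- def check(line, rule):
--     # Note: A mutates line in place (pops); B leaves line unchanged. Return value only.
--     return all(b in rule.get(a, []) for a, b in zip(line, line[1:]))
-- ===== Notes on version B (the rewrite author's own statement) =====
-- stated objective: simpler
-- what changed: Replaced the list-popping tail recursion with a single all() over zip(line, line[1:]) adjacent pairs using dict.get, with no mutation of line.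
import Mathlib
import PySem

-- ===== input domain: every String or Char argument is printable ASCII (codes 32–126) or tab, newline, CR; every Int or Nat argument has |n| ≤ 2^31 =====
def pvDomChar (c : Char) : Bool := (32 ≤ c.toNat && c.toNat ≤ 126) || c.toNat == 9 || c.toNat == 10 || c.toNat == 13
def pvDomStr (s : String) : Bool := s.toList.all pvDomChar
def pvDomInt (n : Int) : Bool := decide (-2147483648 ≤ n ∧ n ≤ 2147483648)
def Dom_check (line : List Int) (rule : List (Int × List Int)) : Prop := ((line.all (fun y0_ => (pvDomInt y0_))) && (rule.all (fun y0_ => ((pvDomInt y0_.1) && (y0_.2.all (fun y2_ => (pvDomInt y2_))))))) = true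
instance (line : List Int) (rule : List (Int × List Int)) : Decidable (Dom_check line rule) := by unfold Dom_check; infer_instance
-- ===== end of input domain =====

-- B replaces A's list-popping tail recursion by one all() over adjacent pairs; return value only
-- (A mutates line in place, B does not).

-- ===== PORT A =====
-- the 'for v in rule[pn]: if v == line[0]: return …' scan: first match wins
def checkScan (vs : List Int) (h : Int) : Bool :=
  match vs with
  | [] => false
  | v :: t => if v = h then true else checkScan t h

def check (line : List Int) (rule : List (Int × List Int)) : Bool :=
  match line with
  | [] => false  -- Python raises IndexError here (line.pop(0)); excluded by Pre_check
  | pn :: rest =>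
    match rest with
    | [] => true
    | h :: _ =>
      match (PySem.Dict.mk rule).get? pn with
      | none => false  -- KeyError swallowed by the bare except
      | some vs => if checkScan vs h then check rest rule else false

-- ===== PORT B =====
def check_alt (line : List Int) (rule : List (Int × List Int)) : Bool :=
  (line.zip (line.drop 1)).all (fun p => ((PySem.Dict.mk rule).getD p.1 []).contains p.2)

-- ===== PRECONDITION & SPEC =====
-- Pre_ excludes the empty line, on which A raises IndexError.
def Pre_check (line : List Int) (rule : List (Int × List Int)) : Prop := line ≠ []
instance (line : List Int) (rule : List (Int × List Int)) : Decidable (Pre_check line rule) := by unfold Pre_check; infer_instance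
def pvWitness_check : List Int × (List (Int × List Int)) := ([1, 2], [(1, [2])])
def Spec_check (line : List Int) (rule : List (Int × List Int)) (out : Bool) : Prop := out = check_alt line rule
instance (line : List Int) (rule : List (Int × List Int)) (out : Bool) : Decidable (Spec_check line rule out) := by unfold Spec_check; infer_instance

-- ===== CLAIM (what is proved, stated in full; the proofs are below) =====
def Claim_equal_check : Prop := ∀ (line : List Int) (rule : List (Int × List Int)), Dom_check line rule → Pre_check line rule → Spec_check line rule (check line rule)

-- ===== LEMMAS AND PROOFS =====
theorem checkScan_eq_contains (vs : List Int) (h : Int) : checkScan vs h = vs.contains h := by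
  induction vs with
  | nil => rfl
  | cons v t ih =>
    by_cases hv : v = h
    · simp [checkScan, hv]
    · simp [checkScan, if_neg hv, ih]
      exact fun heq => absurd heq.symm hv

theorem check_alt_cons2 (pn h : Int) (t : List Int) (rule : List (Int × List Int)) :
    check_alt (pn :: h :: t) rule =
      (((PySem.Dict.mk rule).getD pn []).contains h && check_alt (h :: t) rule) := by
  simp [check_alt]

theorem check_eq_alt (line : List Int) (rule : List (Int × List Int)) (hne : line ≠ []) :
    check line rule = check_alt line rule := by
  induction line with
  | nil => exact absurd rfl hne
  | cons pn rest ih =>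
    cases rest with
    | nil => simp [check, check_alt]
    | cons h t =>
      rw [check_alt_cons2, ← ih (by simp)]
      show (match (PySem.Dict.mk rule).get? pn with
            | none => false
            | some vs => if checkScan vs h then check (h :: t) rule else false) = _
      cases hg : (PySem.Dict.mk rule).get? pn with
      | none => simp [PySem.Dict.getD, hg]
      | some vs =>
        simp only [PySem.Dict.getD, hg, Option.getD_some, checkScan_eq_contains]
        by_cases hc : vs.contains h <;> simp [hc]

-- ===== VERDICT (by name: the statement is the Claim_ definition above) =====
theorem check_spec : Claim_equal_check := by
  intro line rule _ hpre
  unfold Spec_check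
  exact check_eq_alt line rule hpre
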